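-- pv_equiv track=rewrite | github.com/zeriontech/blog | build.py | get_primary_tag
-- ===== SOURCE A (Python) =====
-- def get_primary_tag(tag_names):
--     priority = ["Zerion Wallet", "Zerion API", "Learn", "DeFi", "product updates", "NFTs"]
--     display_map = {"Zerion API": "API", "Zerion Wallet": "Wallet"}
--     for p in priority:
--         if p in tag_names:
--             return display_map.get(p, p)
--     for t in tag_names:
--         if not t.startswith("#"):
--             return display_map.get(t, t)
--     return None
-- ===== SOURCE B (Python) =====
-- def get_primary_tag(tag_names):
--     priority = ["Zerion Wallet", "Zerion API", "Learn", "DeFi", "product updates", "NFTs"]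
--     display_map = {"Zerion API": "API", "Zerion Wallet": "Wallet"}
--     rank = {name: i for i, name in enumerate(priority)}
--     best_name = None
--     best_rank = None
--     for t in tag_names:
--         r = rank.get(t)
--         if r is not None and (best_rank is None or r < best_rank):
--             best_name = t
--             best_rank = r
--     if best_name is not None:
--         return display_map.get(best_name, best_name)
--     return next((display_map.get(t, t) for t in tag_names if not t.startswith("#")), None)
-- ===== Notes on version B (the rewrite author's own statement) =====
-- stated objective: alternative
-- what changed: Replaces the scan over the priority list with membership tests by a rank dictionary and a single min-rank pass over tag_names; the fallback loop for untagged names is unchanged.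
import Mathlib
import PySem

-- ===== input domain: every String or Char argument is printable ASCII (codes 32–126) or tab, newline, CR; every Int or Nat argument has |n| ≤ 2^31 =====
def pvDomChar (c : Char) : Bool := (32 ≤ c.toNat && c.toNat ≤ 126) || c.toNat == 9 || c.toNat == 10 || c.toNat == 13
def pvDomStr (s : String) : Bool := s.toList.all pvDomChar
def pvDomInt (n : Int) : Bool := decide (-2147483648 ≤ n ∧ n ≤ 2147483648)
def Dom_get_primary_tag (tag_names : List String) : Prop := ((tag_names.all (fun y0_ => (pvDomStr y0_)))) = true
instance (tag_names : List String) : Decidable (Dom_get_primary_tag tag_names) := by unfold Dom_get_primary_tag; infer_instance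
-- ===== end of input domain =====

-- B replaces A's scan over the priority list (membership test per priority entry) by a
-- rank dictionary and a single min-rank pass over tag_names; same fallback loop, same results.

-- ===== PORT A =====
def pvPriorityA : List String :=
  ["Zerion Wallet", "Zerion API", "Learn", "DeFi", "product updates", "NFTs"]

def pvDispA : PySem.Dict String String :=
  PySem.Dict.ofList [("Zerion API", "API"), ("Zerion Wallet", "Wallet")]

-- second loop of A: first tag not starting with '#'
def pvAFallback : List String → Option String
  | [] => none
  | t :: ts =>
    if ¬ (PySem.Str.startswith t "#") then some (pvDispA.getD t t) else pvAFallback ts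

-- first loop of A: scan the priority list for a member of tag_names
def pvALoop : List String → List String → Option String
  | [], tags => pvAFallback tags
  | p :: ps, tags =>
    if tags.contains p then some (pvDispA.getD p p) else pvALoop ps tags

def get_primary_tag (tag_names : List String) : Option String :=
  pvALoop pvPriorityA tag_names

-- ===== PORT B =====
def pvPriorityB : List String :=
  ["Zerion Wallet", "Zerion API", "Learn", "DeFi", "product updates", "NFTs"]

def pvDispB : PySem.Dict String String :=
  PySem.Dict.ofList [("Zerion API", "API"), ("Zerion Wallet", "Wallet")]

-- rank = {name: i for i, name in enumerate(priority)}
def pvRank : PySem.Dict String Int :=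
  (PySem.List.enumerate pvPriorityB).foldl (fun d p => d.insert p.2 p.1) PySem.Dict.empty

-- the single pass over tag_names keeping (best_name, best_rank)
def pvBLoop : List String → Option (String × Int) → Option (String × Int)
  | [], best => best
  | t :: ts, best =>
    match pvRank.get? t with
    | none => pvBLoop ts best
    | some r =>
      match best with
      | none => pvBLoop ts (some (t, r))
      | some (_, br) => if r < br then pvBLoop ts (some (t, r)) else pvBLoop ts best

-- next((display_map.get(t, t) for t in tag_names if not t.startswith("#")), None)
def get_primary_tag_alt (tag_names : List String) : Option String :=
  match pvBLoop tag_names none with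
  | some (bn, _) => some (pvDispB.getD bn bn)
  | none =>
    (tag_names.find? (fun t => !(PySem.Str.startswith t "#"))).map (fun t => pvDispB.getD t t)

-- ===== PRECONDITION & SPEC =====
def Spec_get_primary_tag (tag_names : List String) (out : Option String) : Prop := out = get_primary_tag_alt tag_names
instance (tag_names : List String) (out : Option String) : Decidable (Spec_get_primary_tag tag_names out) := by unfold Spec_get_primary_tag; infer_instance

-- ===== CLAIM (what is proved, stated in full; the proofs are below) =====
def Claim_equal_get_primary_tag : Prop := ∀ (tag_names : List String), Dom_get_primary_tag tag_names → Spec_get_primary_tag tag_names (get_primary_tag tag_names)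

-- ===== LEMMAS AND PROOFS =====

theorem pvRank_eq : pvRank = PySem.Dict.mk
    [("Zerion Wallet", 0), ("Zerion API", 1), ("Learn", 2), ("DeFi", 3),
     ("product updates", 4), ("NFTs", 5)] := by decide

-- every key/value pair the rank dictionary can return
theorem pvRk_cases (n : String) (r : Int) (h : pvRank.get? n = some r) :
    (n = "Zerion Wallet" ∧ r = 0) ∨ (n = "Zerion API" ∧ r = 1) ∨ (n = "Learn" ∧ r = 2) ∨
    (n = "DeFi" ∧ r = 3) ∨ (n = "product updates" ∧ r = 4) ∨ (n = "NFTs" ∧ r = 5) := by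
  rw [pvRank_eq] at h
  simp only [PySem.Dict.get?_mk_cons, beq_iff_eq] at h
  split_ifs at h with h1 h2 h3 h4 h5 h6 <;> simp_all [PySem.Dict.get?]

theorem pvBLoop_some_ne_none (ts : List String) (x : String × Int) :
    pvBLoop ts (some x) ≠ none := by
  induction ts generalizing x with
  | nil => simp [pvBLoop]
  | cons t ts ih =>
    simp only [pvBLoop]
    cases h : pvRank.get? t with
    | none => exact ih x
    | some r =>
      obtain ⟨bn, br⟩ := x
      by_cases hc : r < br <;> simp [hc, ih]

theorem pvBLoop_none (ts : List String) (h : pvBLoop ts none = none) :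
    ∀ t ∈ ts, pvRank.get? t = none := by
  induction ts with
  | nil => simp
  | cons t ts ih =>
    intro u hu
    simp only [pvBLoop] at h
    cases hr : pvRank.get? t with
    | some r =>
      simp only [hr] at h
      exact absurd h (pvBLoop_some_ne_none ts (t, r))
    | none =>
      simp only [hr] at h
      rcases List.mem_cons.mp hu with rfl | hu
      · exact hr
      · exact ih h u hu

theorem pvBLoop_const (ts : List String) (b : Option (String × Int))
    (h : ∀ t ∈ ts, pvRank.get? t = none) : pvBLoop ts b = b := by
  induction ts with
  | nil => rfl
  | cons t ts ih =>
    simp only [pvBLoop]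
    rw [h t (by simp)]
    exact ih (fun u hu => h u (by simp [hu]))

theorem pvBLoop_inv (ts : List String) (b : Option (String × Int)) (n : String) (r : Int)
    (hb : ∀ n0 r0, b = some (n0, r0) → pvRank.get? n0 = some r0)
    (h : pvBLoop ts b = some (n, r)) : pvRank.get? n = some r := by
  induction ts generalizing b with
  | nil => exact hb n r h
  | cons t ts ih =>
    cases hr : pvRank.get? t with
    | none =>
      simp only [pvBLoop, hr] at h
      exact ih b hb h
    | some rv =>
      cases b with
      | none =>
        simp only [pvBLoop, hr] at h
        refine ih (some (t, rv)) ?_ h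
        intro n0 r0 h0
        obtain ⟨h1, h2⟩ : t = n0 ∧ rv = r0 := by simpa using h0
        rw [← h1, ← h2]; exact hr
      | some p =>
        obtain ⟨bn, br⟩ := p
        simp only [pvBLoop, hr] at h
        by_cases hc : rv < br
        · rw [if_pos hc] at h
          refine ih (some (t, rv)) ?_ h
          intro n0 r0 h0
          obtain ⟨h1, h2⟩ : t = n0 ∧ rv = r0 := by simpa using h0
          rw [← h1, ← h2]; exact hr
        · rw [if_neg hc] at h
          exact ih (some (bn, br)) hb h

theorem pvBLoop_mem (ts : List String) (b : Option (String × Int)) (n : String) (r : Int)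
    (h : pvBLoop ts b = some (n, r)) : b = some (n, r) ∨ n ∈ ts := by
  induction ts generalizing b with
  | nil => exact Or.inl h
  | cons t ts ih =>
    cases hr : pvRank.get? t with
    | none =>
      simp only [pvBLoop, hr] at h
      rcases ih b h with h' | h' <;> simp [h']
    | some rv =>
      cases b with
      | none =>
        simp only [pvBLoop, hr] at h
        rcases ih (some (t, rv)) h with h' | h'
        · obtain ⟨h1, -⟩ : t = n ∧ rv = r := by simpa using h'
          simp [← h1]
        · simp [h']
      | some p =>
        obtain ⟨bn, br⟩ := p
        simp only [pvBLoop, hr] at h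
        by_cases hc : rv < br
        · rw [if_pos hc] at h
          rcases ih (some (t, rv)) h with h' | h'
          · obtain ⟨h1, -⟩ : t = n ∧ rv = r := by simpa using h'
            simp [← h1]
          · simp [h']
        · rw [if_neg hc] at h
          rcases ih (some (bn, br)) h with h' | h' <;> simp [h']

theorem pvBLoop_le (ts : List String) (b : Option (String × Int)) (n : String) (r : Int)
    (h : pvBLoop ts b = some (n, r)) :
    (∀ t ∈ ts, ∀ rt, pvRank.get? t = some rt → r ≤ rt) ∧
    (∀ n0 r0, b = some (n0, r0) → r ≤ r0) := by
  induction ts generalizing b with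
  | nil =>
    refine ⟨by simp, ?_⟩
    intro n0 r0 h0
    have h' : b = some (n, r) := h
    rw [h'] at h0
    obtain ⟨-, h2⟩ : n = n0 ∧ r = r0 := by simpa using h0
    omega
  | cons t ts ih =>
    cases hr : pvRank.get? t with
    | none =>
      simp only [pvBLoop, hr] at h
      obtain ⟨h1, h2⟩ := ih b h
      refine ⟨?_, h2⟩
      intro u hu rt hrt
      rcases List.mem_cons.mp hu with rfl | hu
      · simp [hr] at hrt
      · exact h1 u hu rt hrt
    | some rv =>
      cases b with
      | none =>
        simp only [pvBLoop, hr] at h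
        obtain ⟨h1, h2⟩ := ih (some (t, rv)) h
        have hrv : r ≤ rv := h2 t rv rfl
        refine ⟨?_, by simp⟩
        intro u hu rt hrt
        rcases List.mem_cons.mp hu with rfl | hu
        · rw [hr] at hrt
          have : rv = rt := Option.some.inj hrt
          omega
        · exact h1 u hu rt hrt
      | some p =>
        obtain ⟨bn, br⟩ := p
        simp only [pvBLoop, hr] at h
        by_cases hc : rv < br
        · rw [if_pos hc] at h
          obtain ⟨h1, h2⟩ := ih (some (t, rv)) h
          have hrv : r ≤ rv := h2 t rv rfl
          refine ⟨?_, ?_⟩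
          · intro u hu rt hrt
            rcases List.mem_cons.mp hu with rfl | hu
            · rw [hr] at hrt
              have : rv = rt := Option.some.inj hrt
              omega
            · exact h1 u hu rt hrt
          · intro n0 r0 h0
            obtain ⟨-, h2'⟩ : bn = n0 ∧ br = r0 := by simpa using h0
            omega
        · rw [if_neg hc] at h
          obtain ⟨h1, h2⟩ := ih (some (bn, br)) h
          have hbr : r ≤ br := h2 bn br rfl
          refine ⟨?_, ?_⟩
          · intro u hu rt hrt
            rcases List.mem_cons.mp hu with rfl | hu
            · rw [hr] at hrt
              have : rv = rt := Option.some.inj hrt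
              omega
            · exact h1 u hu rt hrt
          · intro n0 r0 h0
            obtain ⟨-, h2'⟩ : bn = n0 ∧ br = r0 := by simpa using h0
            omega

-- the two priority names with the same rank are equal
theorem pvRk_inj (m n : String) (r : Int) (hm : pvRank.get? m = some r)
    (hn : pvRank.get? n = some r) : m = n := by
  rcases pvRk_cases m r hm with ⟨rfl, rfl⟩ | ⟨rfl, rfl⟩ | ⟨rfl, rfl⟩ | ⟨rfl, rfl⟩ | ⟨rfl, rfl⟩ | ⟨rfl, rfl⟩ <;>
    rcases pvRk_cases n _ hn with ⟨rfl, h⟩ | ⟨rfl, h⟩ | ⟨rfl, h⟩ | ⟨rfl, h⟩ | ⟨rfl, h⟩ | ⟨rfl, h⟩ <;>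
    first | rfl | omega

-- B's pass finds exactly the priority member of tag_names with the least rank
theorem pvBLoop_exact (tags : List String) (n : String) (r : Int)
    (hn : pvRank.get? n = some r) (hmem : n ∈ tags)
    (hmin : ∀ m rm, pvRank.get? m = some rm → rm < r → m ∉ tags) :
    pvBLoop tags none = some (n, r) := by
  cases e : pvBLoop tags none with
  | none => exact absurd (pvBLoop_none tags e n hmem) (by simp [hn])
  | some p =>
    obtain ⟨bn, br⟩ := p
    have hinv : pvRank.get? bn = some br := pvBLoop_inv tags none bn br (by simp) e
    have hle : br ≤ r := (pvBLoop_le tags none bn br e).1 n hmem r hn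
    have hbmem : bn ∈ tags := by
      rcases pvBLoop_mem tags none bn br e with h | h
      · exact absurd h (by simp)
      · exact h
    have : ¬ br < r := fun hlt => hmin bn br hinv hlt hbmem
    have hbr : br = r := by omega
    subst hbr
    rw [pvRk_inj bn n br hinv hn]

theorem pvFallback_eq (ts : List String) : pvAFallback ts =
    (ts.find? (fun t => !(PySem.Str.startswith t "#"))).map (fun t => pvDispB.getD t t) := by
  induction ts with
  | nil => rfl
  | cons t ts ih =>
    simp only [pvAFallback]
    by_cases h : PySem.Str.startswith t "#" = true
    · rw [if_neg (not_not_intro h),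
        List.find?_cons_of_neg (by show ¬(!PySem.Str.startswith t "#") = true; rw [h]; simp)]
      exact ih
    · have h' : PySem.Str.startswith t "#" = false := Bool.eq_false_iff.mpr h
      rw [if_pos h,
        List.find?_cons_of_pos (by show (!PySem.Str.startswith t "#") = true; rw [h']; rfl)]
      rfl

-- ===== VERDICT (by name: the statement is the Claim_ definition above) =====
theorem get_primary_tag_spec : Claim_equal_get_primary_tag := by
  intro tags _
  unfold Spec_get_primary_tag get_primary_tag get_primary_tag_alt
  simp only [pvPriorityA, pvALoop]
  have mem_of : ∀ p : String, tags.contains p = true → p ∈ tags := by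
    intro p hp; simpa using hp
  have nmem_of : ∀ p : String, ¬ (tags.contains p = true) → p ∉ tags := by
    intro p hp hm; exact hp (by simpa using hm)
  split_ifs with h0 h1 h2 h3 h4 h5
  · rw [pvBLoop_exact tags "Zerion Wallet" 0 (by decide) (mem_of _ h0)
      (by intro m rm hm hlt; rcases pvRk_cases m rm hm with ⟨rfl, rfl⟩ | ⟨rfl, rfl⟩ | ⟨rfl, rfl⟩ | ⟨rfl, rfl⟩ | ⟨rfl, rfl⟩ | ⟨rfl, rfl⟩ <;> omega)]
    rfl
  · rw [pvBLoop_exact tags "Zerion API" 1 (by decide) (mem_of _ h1)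
      (by intro m rm hm hlt; rcases pvRk_cases m rm hm with ⟨rfl, rfl⟩ | ⟨rfl, rfl⟩ | ⟨rfl, rfl⟩ | ⟨rfl, rfl⟩ | ⟨rfl, rfl⟩ | ⟨rfl, rfl⟩ <;> first | omega | exact nmem_of _ h0)]
    rfl
  · rw [pvBLoop_exact tags "Learn" 2 (by decide) (mem_of _ h2)
      (by intro m rm hm hlt; rcases pvRk_cases m rm hm with ⟨rfl, rfl⟩ | ⟨rfl, rfl⟩ | ⟨rfl, rfl⟩ | ⟨rfl, rfl⟩ | ⟨rfl, rfl⟩ | ⟨rfl, rfl⟩ <;> first | omega | exact nmem_of _ h0 | exact nmem_of _ h1)]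
    rfl
  · rw [pvBLoop_exact tags "DeFi" 3 (by decide) (mem_of _ h3)
      (by intro m rm hm hlt; rcases pvRk_cases m rm hm with ⟨rfl, rfl⟩ | ⟨rfl, rfl⟩ | ⟨rfl, rfl⟩ | ⟨rfl, rfl⟩ | ⟨rfl, rfl⟩ | ⟨rfl, rfl⟩ <;> first | omega | exact nmem_of _ h0 | exact nmem_of _ h1 | exact nmem_of _ h2)]
    rfl
  · rw [pvBLoop_exact tags "product updates" 4 (by decide) (mem_of _ h4)
      (by intro m rm hm hlt; rcases pvRk_cases m rm hm with ⟨rfl, rfl⟩ | ⟨rfl, rfl⟩ | ⟨rfl, rfl⟩ | ⟨rfl, rfl⟩ | ⟨rfl, rfl⟩ | ⟨rfl, rfl⟩ <;> first | omega | exact nmem_of _ h0 | exact nmem_of _ h1 | exact nmem_of _ h2 | exact nmem_of _ h3)]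
    rfl
  · rw [pvBLoop_exact tags "NFTs" 5 (by decide) (mem_of _ h5)
      (by intro m rm hm hlt; rcases pvRk_cases m rm hm with ⟨rfl, rfl⟩ | ⟨rfl, rfl⟩ | ⟨rfl, rfl⟩ | ⟨rfl, rfl⟩ | ⟨rfl, rfl⟩ | ⟨rfl, rfl⟩ <;> first | omega | exact nmem_of _ h0 | exact nmem_of _ h1 | exact nmem_of _ h2 | exact nmem_of _ h3 | exact nmem_of _ h4)]
    rfl
  · rw [pvBLoop_const tags none
      (by intro t ht; cases hr : pvRank.get? t with
          | none => rfl
          | some r =>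
            rcases pvRk_cases t r hr with ⟨rfl, rfl⟩ | ⟨rfl, rfl⟩ | ⟨rfl, rfl⟩ | ⟨rfl, rfl⟩ | ⟨rfl, rfl⟩ | ⟨rfl, rfl⟩ <;>
              first | exact absurd ht (nmem_of _ h0) | exact absurd ht (nmem_of _ h1) | exact absurd ht (nmem_of _ h2) | exact absurd ht (nmem_of _ h3) | exact absurd ht (nmem_of _ h4) | exact absurd ht (nmem_of _ h5))]
    exact pvFallback_eq tags
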